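-- pv_equiv track=rewrite | github.com/sandesh-argon/atlas | archive/legacy/v2.0/precompute_permutations/precompute_all_graphs.py | compress_layers
-- ===== SOURCE A (Python) =====
-- def get_layer_bands(layer_mode):
--     """Get layer compression bands."""
--     if layer_mode == 2:
--         return [[i for i in range(11)], [i for i in range(11, 21)]]
--     elif layer_mode == 3:
--         return [[i for i in range(7)], [i for i in range(7, 14)], [i for i in range(14, 21)]]
--     elif layer_mode == 5:
--         return [[0], [1,2,3,4,5], [6,7,8,9,10,11,12,13,14], [15,16,17,18], [19,20]]
--     else:  # 21 layers (full)
--         return [[i] for i in range(21)]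
--
-- def compress_layers(nodes, layer_mode):
--     """Apply layer compression to nodes."""
--     bands = get_layer_bands(layer_mode)
--
--     for node in nodes:
--         layer = node.get('causal_layer', 0)
--         band_idx = -1
--         for i, band in enumerate(bands):
--             if layer in band:
--                 band_idx = i
--                 break
--         node['display_layer'] = band_idx if band_idx >= 0 else 0
--         node['band_size'] = len(bands[band_idx]) if band_idx >= 0 and band_idx < len(bands) else 1
--
--     return nodes
-- ===== SOURCE B (Python) =====
-- def _band_info(layer_mode, layer):
--     """Closed-form (band index, band size) for a causal layer; (0, 1) outside 0..20."""
--     if not (0 <= layer <= 20):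
--         return (0, 1)
--     if layer_mode == 2:
--         return (0, 11) if layer < 11 else (1, 10)
--     if layer_mode == 3:
--         return (layer // 7, 7)
--     if layer_mode == 5:
--         if layer == 0:
--             return (0, 1)
--         if layer <= 5:
--             return (1, 5)
--         if layer <= 14:
--             return (2, 9)
--         if layer <= 18:
--             return (3, 4)
--         return (4, 2)
--     return (layer, 1)
--
-- def compress_layers(nodes, layer_mode):
--     """Apply layer compression to nodes (mutates them in place, like the original)."""
--     for node in nodes:
--         bi, bs = _band_info(layer_mode, node.get('causal_layer', 0))
--         node['display_layer'] = bi
--         node['band_size'] = bs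
--     return nodes
-- ===== Notes on version B (the rewrite author's own statement) =====
-- stated objective: simpler
-- what changed: B replaces the band lists and A's per-node linear scan with a closed-form arithmetic function (comparisons and one floor division) giving (band index, band size) directly from the layer value; no band lists are built at all.
import Mathlib
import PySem

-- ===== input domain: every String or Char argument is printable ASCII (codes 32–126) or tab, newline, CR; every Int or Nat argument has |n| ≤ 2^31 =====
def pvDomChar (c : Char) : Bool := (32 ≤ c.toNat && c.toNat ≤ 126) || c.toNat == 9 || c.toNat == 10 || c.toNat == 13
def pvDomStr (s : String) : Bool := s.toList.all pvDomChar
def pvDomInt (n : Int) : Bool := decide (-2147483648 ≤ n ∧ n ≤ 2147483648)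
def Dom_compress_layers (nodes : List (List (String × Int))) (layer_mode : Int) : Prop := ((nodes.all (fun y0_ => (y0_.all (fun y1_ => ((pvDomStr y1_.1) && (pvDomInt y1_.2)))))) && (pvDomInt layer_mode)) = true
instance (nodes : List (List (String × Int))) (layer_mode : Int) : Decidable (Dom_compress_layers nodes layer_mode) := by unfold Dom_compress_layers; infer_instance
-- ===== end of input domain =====

-- B replaces A's band lists and per-node linear scan by a closed-form arithmetic function
-- (band index, band size) of the layer value; return values are proved equal (both Pythons
-- mutate the nodes in place in the same way; the claim here is about the returned value).

-- ===== PORT A =====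
def get_layer_bands (layer_mode : Int) : List (List Int) :=
  if layer_mode == 2 then [PySem.List.pyRange 0 11 1, PySem.List.pyRange 11 21 1]
  else if layer_mode == 3 then [PySem.List.pyRange 0 7 1, PySem.List.pyRange 7 14 1, PySem.List.pyRange 14 21 1]
  else if layer_mode == 5 then [[0], [1,2,3,4,5], [6,7,8,9,10,11,12,13,14], [15,16,17,18], [19,20]]
  else (PySem.List.pyRange 0 21 1).map (fun i => [i])

-- the 'for i, band in enumerate(bands): if layer in band: band_idx = i; break' loop
def pvFindBand (layer : Int) : Int → List (List Int) → Int
  | _, [] => -1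
  | i, b :: rest => if b.contains layer then i else pvFindBand layer (i+1) rest

def compress_layers (nodes : List (List (String × Int))) (layer_mode : Int) : List (List (String × Int)) :=
  let bands := get_layer_bands layer_mode
  nodes.map (fun node =>
    let layer := (PySem.Dict.mk node).getD "causal_layer" 0
    let band_idx := pvFindBand layer 0 bands
    let d := (PySem.Dict.mk node).insert "display_layer" (if 0 ≤ band_idx then band_idx else 0)
    let d := d.insert "band_size"
      (if 0 ≤ band_idx ∧ band_idx < (bands.length : Int)
       then (((PySem.List.pyGet? bands band_idx).getD []).length : Int) else 1)
    d.items)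

-- ===== PORT B =====
-- closed-form (band index, band size); '//' is Python floor division = PySem.Int.floordiv
def pvBandInfo (layer_mode layer : Int) : Int × Int :=
  if layer < 0 ∨ 20 < layer then (0, 1)
  else if layer_mode == 2 then (if layer < 11 then (0, 11) else (1, 10))
  else if layer_mode == 3 then (PySem.Int.floordiv layer 7, 7)
  else if layer_mode == 5 then
    (if layer == 0 then (0, 1)
     else if layer ≤ 5 then (1, 5)
     else if layer ≤ 14 then (2, 9)
     else if layer ≤ 18 then (3, 4)
     else (4, 2))
  else (layer, 1)

def compress_layers_alt (nodes : List (List (String × Int))) (layer_mode : Int) : List (List (String × Int)) :=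
  nodes.map (fun node =>
    let p := pvBandInfo layer_mode ((PySem.Dict.mk node).getD "causal_layer" 0)
    (((PySem.Dict.mk node).insert "display_layer" p.1).insert "band_size" p.2).items)

-- ===== PRECONDITION & SPEC =====
def Spec_compress_layers (nodes : List (List (String × Int))) (layer_mode : Int) (out : List (List (String × Int))) : Prop := out = compress_layers_alt nodes layer_mode
instance (nodes : List (List (String × Int))) (layer_mode : Int) (out : List (List (String × Int))) : Decidable (Spec_compress_layers nodes layer_mode out) := by unfold Spec_compress_layers; infer_instance

-- ===== CLAIM =====
def Claim_equal_compress_layers : Prop := ∀ (nodes : List (List (String × Int))) (layer_mode : Int), Dom_compress_layers nodes layer_mode → Spec_compress_layers nodes layer_mode (compress_layers nodes layer_mode)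

-- ===== LEMMAS AND PROOFS =====

lemma findBand_none (layer : Int) (bands : List (List Int)) (i : Int)
    (h : ∀ b ∈ bands, layer ∉ b) : pvFindBand layer i bands = -1 := by
  induction bands generalizing i with
  | nil => rfl
  | cons b rest ih =>
    simp only [pvFindBand]
    rw [if_neg, ih]
    · intro b' hb'; exact h b' (List.mem_cons_of_mem _ hb')
    · simpa using h b (List.mem_cons_self ..)

-- layers 0..20: every band of every mode is contained in [0, 21)
lemma bands_subset (layer_mode layer : Int) (b : List Int)
    (hb : b ∈ get_layer_bands layer_mode) (hl : layer ∈ b) : 0 ≤ layer ∧ layer < 21 := by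
  unfold get_layer_bands at hb
  split_ifs at hb <;> simp [PySem.List.mem_pyRange_one] at hb
  · rcases hb with rfl | rfl <;> rw [PySem.List.mem_pyRange_one] at hl <;> omega
  · rcases hb with rfl | rfl | rfl <;> rw [PySem.List.mem_pyRange_one] at hl <;> omega
  · rcases hb with rfl | rfl | rfl | rfl | rfl <;> simp at hl <;> omega
  · obtain ⟨i, hi, rfl⟩ := hb; simp at hl; omega

lemma glb_else (layer_mode : Int) (h2 : layer_mode ≠ 2) (h3 : layer_mode ≠ 3) (h5 : layer_mode ≠ 5) :
    get_layer_bands layer_mode = (PySem.List.pyRange 0 21 1).map (fun i => [i]) := by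
  unfold get_layer_bands
  rw [if_neg (by simpa using h2), if_neg (by simpa using h3), if_neg (by simpa using h5)]

-- the crux: B's closed form equals A's scan result, packaged as the (display_layer, band_size) pair
lemma key_lemma (layer_mode layer : Int) :
    pvBandInfo layer_mode layer
      = (let bands := get_layer_bands layer_mode
         let bi := pvFindBand layer 0 bands
         ((if 0 ≤ bi then bi else 0),
          (if 0 ≤ bi ∧ bi < (bands.length : Int)
           then (((PySem.List.pyGet? bands bi).getD []).length : Int) else 1))) := by
  by_cases hr : 0 ≤ layer ∧ layer < 21
  · obtain ⟨hl, hu⟩ := hr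
    by_cases h2 : layer_mode = 2
    · subst h2; interval_cases layer <;> decide
    · by_cases h3 : layer_mode = 3
      · subst h3; interval_cases layer <;> decide
      · by_cases h5 : layer_mode = 5
        · subst h5; interval_cases layer <;> decide
        · rw [glb_else layer_mode h2 h3 h5]
          unfold pvBandInfo
          rw [if_neg (by omega), if_neg (by simpa using h2), if_neg (by simpa using h3),
              if_neg (by simpa using h5)]
          interval_cases layer <;> decide
  · have hnb : ∀ b ∈ get_layer_bands layer_mode, layer ∉ b := by
      intro b hb hl
      exact hr (bands_subset layer_mode layer b hb hl)
    unfold pvBandInfo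
    rw [if_pos (by omega)]
    simp only
    rw [findBand_none _ _ _ hnb]
    norm_num

-- ===== VERDICT =====
theorem compress_layers_spec : Claim_equal_compress_layers := by
  intro nodes layer_mode _
  unfold Spec_compress_layers compress_layers compress_layers_alt
  apply List.map_congr_left
  intro node _
  have h := key_lemma layer_mode ((PySem.Dict.mk node).getD "causal_layer" 0)
  simp only at h ⊢
  rw [h]
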